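-- pv_equiv track=rewrite | github.com/KjeldSchmidt/advent-of-code-2022 | python/08-solution.py | visible_trees_from_left
-- ===== SOURCE A (Python) =====
-- def visible_trees_from_left(forest) -> list[tuple[int, int]]:
--     visible_trees = []
--     for idx, row in enumerate(forest):
--         max_tree = -1
--         for jdx, tree in enumerate(row):
--             if tree > max_tree:
--                 visible_trees.append((idx, jdx))
--                 max_tree = tree
--     return visible_trees
-- ===== SOURCE B (Python) =====
-- def visible_trees_from_left(forest) -> list[tuple[int, int]]:
--     visible_trees = []
--     for idx, row in enumerate(forest):
--         # pass 1: prior_max[j] = max of -1 and all trees strictly before position j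
--         prior_max = [-1]
--         for tree in row:
--             prior_max.append(max(prior_max[-1], tree))
--         # pass 2: a tree is visible iff it beats everything before it
--         for jdx, (tree, m) in enumerate(zip(row, prior_max)):
--             if tree > m:
--                 visible_trees.append((idx, jdx))
--     return visible_trees
-- ===== Notes on version B (the rewrite author's own statement) =====
-- stated objective: alternative
-- what changed: Per row, B first builds a prefix-maximum table (max of all strictly earlier trees, seeded with -1) and then in a separate pass filters the positions whose tree exceeds that prior max, instead of A's single inline compare-and-update scan.
import Mathlib
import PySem

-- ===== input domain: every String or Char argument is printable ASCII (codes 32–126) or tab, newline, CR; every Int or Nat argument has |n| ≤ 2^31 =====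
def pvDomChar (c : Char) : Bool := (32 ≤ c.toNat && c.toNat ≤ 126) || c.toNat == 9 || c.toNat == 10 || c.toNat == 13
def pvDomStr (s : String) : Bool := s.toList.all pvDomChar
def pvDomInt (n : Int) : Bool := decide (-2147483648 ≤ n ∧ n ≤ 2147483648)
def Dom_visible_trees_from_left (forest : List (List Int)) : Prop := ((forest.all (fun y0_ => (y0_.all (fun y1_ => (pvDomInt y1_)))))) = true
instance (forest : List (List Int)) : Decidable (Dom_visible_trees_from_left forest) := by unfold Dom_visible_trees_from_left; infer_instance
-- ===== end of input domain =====

-- ===== PORT A =====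
-- A: single scan per row keeping the running maximum; append when the tree beats it.
def visible_trees_from_left (forest : List (List Int)) : List (Int × Int) :=
  (PySem.List.enumerate forest).foldl (fun visible_trees p =>
    ((PySem.List.enumerate p.2).foldl
      (fun (st : List (Int × Int) × Int) q =>
        if q.2 > st.2 then (st.1 ++ [(p.1, q.1)], q.2) else st)
      (visible_trees, -1)).1) []

-- ===== PORT B =====
-- B: per row, build the prefix-maximum table (prior_max), then filter positions
-- whose tree exceeds the max of all strictly earlier trees.
-- prefMaxes m row = the first row.length entries of Source B's prior_max list
-- (zip(row, prior_max) truncates the last entry, so only these are used).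
def prefMaxes (m : Int) : List Int → List Int
  | [] => []
  | t :: ts => m :: prefMaxes (max m t) ts

def visible_trees_from_left_alt (forest : List (List Int)) : List (Int × Int) :=
  (PySem.List.enumerate forest).foldl (fun visible_trees p =>
    (PySem.List.enumerate (p.2.zip (prefMaxes (-1) p.2))).foldl
      (fun acc q => if q.2.1 > q.2.2 then acc ++ [(p.1, q.1)] else acc)
      visible_trees) []

-- ===== PRECONDITION & SPEC =====
def Spec_visible_trees_from_left (forest : List (List Int)) (out : List (Int × Int)) : Prop := out = visible_trees_from_left_alt forest
instance (forest : List (List Int)) (out : List (Int × Int)) : Decidable (Spec_visible_trees_from_left forest out) := by unfold Spec_visible_trees_from_left; infer_instance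

-- ===== CLAIM (what is proved, stated in full; the proofs are below) =====
def Claim_equal_visible_trees_from_left : Prop := ∀ (forest : List (List Int)), Dom_visible_trees_from_left forest → Spec_visible_trees_from_left forest (visible_trees_from_left forest)

-- ===== LEMMAS AND PROOFS =====

theorem innerA_eq (idx : Int) (row : List Int) :
    ∀ (m : Int) (j : Int) (vis : List (Int × Int)),
    ((PySem.List.enumerate row j).foldl
      (fun (st : List (Int × Int) × Int) q =>
        if q.2 > st.2 then (st.1 ++ [(idx, q.1)], q.2) else st)
      (vis, m)).1
    = vis ++ ((PySem.List.enumerate (row.zip (prefMaxes m row)) j).filter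
        (fun q => decide (q.2.1 > q.2.2))).map (fun q => (idx, q.1)) := by
  induction row with
  | nil => intro m j vis; simp [prefMaxes]
  | cons t ts ih =>
    intro m j vis
    simp only [prefMaxes, List.zip_cons_cons, PySem.List.enumerate_cons, List.foldl_cons,
      List.filter_cons]
    by_cases h : m < t
    · rw [if_pos h, ih]
      simp [h, max_eq_right h.le]
    · rw [if_neg h, ih]
      simp [h, max_eq_left (not_lt.mp h)]

theorem innerB_eq (idx : Int) (L : List (Int × (Int × Int))) :
    ∀ (acc : List (Int × Int)),
    L.foldl (fun acc q => if q.2.1 > q.2.2 then acc ++ [(idx, q.1)] else acc) acc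
    = acc ++ (L.filter (fun q => decide (q.2.1 > q.2.2))).map (fun q => (idx, q.1)) := by
  induction L with
  | nil => simp
  | cons x xs ih =>
    intro acc
    by_cases h : x.2.1 > x.2.2 <;> simp [h, ih]

theorem outer_eq (forest : List (List Int)) :
    ∀ (i : Int) (vis : List (Int × Int)),
    (PySem.List.enumerate forest i).foldl (fun visible_trees p =>
      ((PySem.List.enumerate p.2).foldl
        (fun (st : List (Int × Int) × Int) q =>
          if q.2 > st.2 then (st.1 ++ [(p.1, q.1)], q.2) else st)
        (visible_trees, -1)).1) vis
    = (PySem.List.enumerate forest i).foldl (fun visible_trees p =>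
      (PySem.List.enumerate (p.2.zip (prefMaxes (-1) p.2))).foldl
        (fun acc q => if q.2.1 > q.2.2 then acc ++ [(p.1, q.1)] else acc)
        visible_trees) vis := by
  induction forest with
  | nil => simp
  | cons row rows ih =>
    intro i vis
    simp only [PySem.List.enumerate_cons, List.foldl_cons]
    rw [innerA_eq, innerB_eq, ih]

-- ===== VERDICT (by name: the statement is the Claim_ definition above) =====
theorem visible_trees_from_left_spec : Claim_equal_visible_trees_from_left := by
  intro forest _
  unfold Spec_visible_trees_from_left visible_trees_from_left visible_trees_from_left_alt
  exact outer_eq forest 0 []
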